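-- pv_equiv track=rewrite | github.com/YEONGORI/Algorithm | Programmers/IMPLEMENTATION/문자열재정렬.py | solution_my
-- ===== SOURCE A (Python) =====
-- def solution_my(c_list) -> str:
--     n_list = list()
--     result = str()
--     value = 0
--
--     for c in c_list:
--         n_list.append(ord(c))
--     n_list.sort()
--
--     for n in n_list:
--         if n > 47 and n < 58:
--             value += int(chr(n))
--         else:
--             result += chr(n)
--     result += str(value)
--
--     return result
-- ===== SOURCE B (Python) =====
-- def solution_my(c_list) -> str:
--     counts = [0] * 128
--     digit_sum = 0
--     for c in c_list:
--         o = ord(c)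
--         if 48 <= o <= 57:
--             digit_sum += o - 48
--         else:
--             counts[o] += 1
--     return ''.join(chr(i) * counts[i] for i in range(128)) + str(digit_sum)
-- ===== Notes on version B (the rewrite author's own statement) =====
-- stated objective: faster
-- what changed: replaced the sort-then-scan (build ord list, sort it, then split digits from the rest) by a single counting pass over the string with a 128-slot counting-sort table and a running digit sum
import Mathlib
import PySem

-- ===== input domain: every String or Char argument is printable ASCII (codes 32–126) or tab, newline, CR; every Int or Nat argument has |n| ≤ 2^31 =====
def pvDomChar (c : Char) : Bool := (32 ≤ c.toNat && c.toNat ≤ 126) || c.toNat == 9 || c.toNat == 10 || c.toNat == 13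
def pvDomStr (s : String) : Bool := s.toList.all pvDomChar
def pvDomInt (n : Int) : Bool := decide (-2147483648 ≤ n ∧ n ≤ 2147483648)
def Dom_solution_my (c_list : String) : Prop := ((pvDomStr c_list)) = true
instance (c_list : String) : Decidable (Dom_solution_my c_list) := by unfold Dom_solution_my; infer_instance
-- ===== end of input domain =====

-- B replaces A's sort-then-scan by one counting pass (128-slot table + running digit sum); equivalence is about the return value.

-- ===== PORT A =====
-- int(chr(n)) of A's digit branch (exact where chr(n) is a decimal digit, the only place A calls it)
def pyIntChr (n : Int) : Int := (PySem.Int.ofChars? [Char.ofNat n.toNat]).getD 0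

def solution_my (c_list : String) : String :=
  -- n_list = [ord(c) for appended c]; n_list.sort()
  let n_list : List Int := c_list.toList.foldl (fun acc c => acc ++ [(c.toNat : Int)]) []
  let n_sorted := PySem.List.sorted n_list (fun x => x) false
  -- second loop: (result, value) accumulator
  let st := n_sorted.foldl
    (fun (st : List Char × Int) n =>
      if 47 < n ∧ n < 58 then (st.1, st.2 + pyIntChr n)
      else (st.1 ++ [Char.ofNat n.toNat], st.2))
    ([], 0)
  String.ofList (st.1 ++ PySem.Int.toChars st.2)

-- ===== PORT B =====
def solution_my_alt (c_list : String) : String :=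
  let st := c_list.toList.foldl
    (fun (st : List Int × Int) c =>
      let o : Nat := c.toNat
      if 48 ≤ o ∧ o ≤ 57 then (st.1, st.2 + ((o : Int) - 48))
      else (st.1.set o (st.1.getD o 0 + 1), st.2))
    (List.replicate 128 0, 0)
  String.ofList ((((List.range 128).map
      (fun i => List.replicate (st.1.getD i 0).toNat (Char.ofNat i))).flatten)
    ++ PySem.Int.toChars st.2)

-- ===== PRECONDITION & SPEC =====
def Spec_solution_my (c_list : String) (out : String) : Prop := out = solution_my_alt c_list
instance (c_list : String) (out : String) : Decidable (Spec_solution_my c_list out) := by unfold Spec_solution_my; infer_instance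

-- ===== CLAIM (what is proved, stated in full; the proofs are below) =====
def Claim_equal_solution_my : Prop := ∀ (c_list : String), Dom_solution_my c_list → Spec_solution_my c_list (solution_my c_list)

-- ===== LEMMAS AND PROOFS =====

-- character-level digit test and digit sum shared by the characterizations
def isDig (c : Char) : Bool := decide (48 ≤ c.toNat) && decide (c.toNat ≤ 57)
def digSum (l : List Char) : Int :=
  ((l.filter isDig).map (fun c => (c.toNat : Int) - 48)).sum

theorem pyIntChr_digit (n : Int) (h1 : 47 < n) (h2 : n < 58) : pyIntChr n = n - 48 := by
  interval_cases n <;> decide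

-- A's second loop: splits the (sorted) codes into non-digit characters and the digit sum
theorem A_loop (m : List Int) (r : List Char) (v : Int) :
    m.foldl (fun (st : List Char × Int) n =>
        if 47 < n ∧ n < 58 then (st.1, st.2 + pyIntChr n)
        else (st.1 ++ [Char.ofNat n.toNat], st.2)) (r, v)
    = (r ++ (m.filter (fun n => !decide (47 < n ∧ n < 58))).map (fun n => Char.ofNat n.toNat),
       v + ((m.filter (fun n => decide (47 < n ∧ n < 58))).map (fun n => n - 48)).sum) := by
  induction m generalizing r v with
  | nil => simp
  | cons n t ih =>
    by_cases h : 47 < n ∧ n < 58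
    · simp [List.foldl_cons, h, ih, pyIntChr_digit n h.1 h.2]
      ring
    · have hp : (!decide (47 < n) || !decide (n < 58)) = true := by
        simp; omega
      simp [List.foldl_cons, h, ih, hp]

-- B's single pass: running digit sum plus a 128-slot occurrence table of the non-digit chars
theorem B_loop (l : List Char) (counts : List Int) (v : Int)
    (hb : ∀ c ∈ l, c.toNat < counts.length) :
    (l.foldl (fun (st : List Int × Int) c =>
        let o : Nat := c.toNat
        if 48 ≤ o ∧ o ≤ 57 then (st.1, st.2 + ((o : Int) - 48))
        else (st.1.set o (st.1.getD o 0 + 1), st.2)) (counts, v)).2 = v + digSum l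
    ∧ ∀ i : Nat,
      (l.foldl (fun (st : List Int × Int) c =>
        let o : Nat := c.toNat
        if 48 ≤ o ∧ o ≤ 57 then (st.1, st.2 + ((o : Int) - 48))
        else (st.1.set o (st.1.getD o 0 + 1), st.2)) (counts, v)).1.getD i 0
      = counts.getD i 0 + (l.countP (fun c => !isDig c && c.toNat == i) : Int) := by
  induction l generalizing counts v with
  | nil => simp [digSum]
  | cons c t ih =>
    by_cases h : 48 ≤ c.toNat ∧ c.toNat ≤ 57
    · have hdig : isDig c = true := by simp [isDig]; omega
      have := ih counts (v + ((c.toNat : Int) - 48)) (fun c hc => hb c (List.mem_cons_of_mem _ hc))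
      refine ⟨?_, ?_⟩
      · rw [List.foldl_cons, if_pos h, this.1]
        simp [digSum, hdig]; ring
      · intro i
        rw [List.foldl_cons, if_pos h, this.2 i]
        simp [hdig]
    · have hdig : isDig c = false := by simp [isDig]; omega
      have hlen : c.toNat < counts.length := hb c List.mem_cons_self
      have hb' : ∀ x ∈ t, x.toNat < (counts.set c.toNat (counts.getD c.toNat 0 + 1)).length := by
        intro x hx; rw [List.length_set]; exact hb x (List.mem_cons_of_mem _ hx)
      have := ih (counts.set c.toNat (counts.getD c.toNat 0 + 1)) v hb'
      refine ⟨?_, ?_⟩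
      · rw [List.foldl_cons, if_neg h, this.1]
        simp [digSum, hdig]
      · intro i
        rw [List.foldl_cons, if_neg h, this.2 i]
        have hset : (counts.set c.toNat (counts.getD c.toNat 0 + 1)).getD i 0
            = counts.getD i 0 + (if c.toNat = i then (1 : Int) else 0) := by
          by_cases he : c.toNat = i
          · subst he
            simp [List.getD_eq_getElem?_getD, hlen]
          · simp [List.getD_eq_getElem?_getD, List.getElem?_set_ne he, he]
        rw [hset, List.countP_cons]
        by_cases he : c.toNat = i <;> simp [he, hdig] <;> ring

-- counting sort produces a permutation of the input (codes all in [0, N))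
theorem cs_perm (N : Nat) : ∀ (m : List Int), (∀ x ∈ m, 0 ≤ x ∧ x < N) →
    (((List.range N).map (fun (i : Nat) => List.replicate (m.count (i : Int)) (i : Int))).flatten).Perm m := by
  induction N with
  | zero =>
    intro m hm
    cases m with
    | nil => simp
    | cons a t => exact absurd (hm a List.mem_cons_self) (by omega)
  | succ N ih =>
    intro m hm
    set m' := m.filter (fun x => !(x == (N : Int))) with hm'
    have hcount : ∀ i ∈ List.range N, m'.count (i : Int) = m.count (i : Int) := by
      intro i hi
      have hi' : i < N := List.mem_range.mp hi
      exact List.count_filter (by simp; omega)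
    have hmap : (List.range N).map (fun (i : Nat) => List.replicate (m.count (i : Int)) (i : Int))
        = (List.range N).map (fun (i : Nat) => List.replicate (m'.count (i : Int)) (i : Int)) :=
      List.map_congr_left (fun i hi => by rw [hcount i hi])
    have hm'bound : ∀ x ∈ m', 0 ≤ x ∧ x < N := by
      intro x hx
      have hxm : x ∈ m := List.mem_of_mem_filter hx
      have hne : ¬ (x = (N : Int)) := by
        have := List.of_mem_filter hx
        simpa using this
      have := hm x hxm
      omega
    have hrepl : List.replicate (m.count (N : Int)) (N : Int)
        = m.filter (fun x => x == (N : Int)) := by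
      rw [show (fun x : Int => x == (N : Int)) = (fun x : Int => decide (x = (N : Int))) from by
        funext x; rfl]
      exact (List.filter_eq (N : Int)).symm
    have h1 : (((List.range (N + 1)).map
            (fun (i : Nat) => List.replicate (m.count (i : Int)) (i : Int))).flatten)
        = (((List.range N).map (fun (i : Nat) => List.replicate (m'.count (i : Int)) (i : Int))).flatten)
            ++ List.replicate (m.count (N : Int)) (N : Int) := by
      rw [List.range_succ, List.map_append, List.flatten_append, hmap]; simp
    have h2 : (m' ++ m.filter (fun x => x == (N : Int))).Perm m := by
      simpa [hm'] using List.filter_append_perm (fun x => !(x == (N : Int))) m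
    rw [h1, hrepl]
    exact ((ih m' hm'bound).append_right _).trans h2

-- the counting-sort output is weakly increasing
theorem cs_pairwise (N : Nat) (cnt : Nat → Nat) :
    (((List.range N).map (fun (i : Nat) => List.replicate (cnt i) (i : Int))).flatten).Pairwise (· ≤ ·) := by
  rw [List.pairwise_flatten]
  constructor
  · intro l hl
    obtain ⟨i, _, rfl⟩ := List.mem_map.mp hl
    rw [List.pairwise_replicate]
    right; exact le_refl _
  · rw [List.pairwise_map]
    refine List.Pairwise.imp ?_ List.pairwise_lt_range
    intro i j hij x hx y hy
    rw [List.eq_of_mem_replicate hx, List.eq_of_mem_replicate hy]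
    exact_mod_cast le_of_lt hij

-- the two Bool digit tests agree through ord
theorem dig_code (c : Char) :
    decide (47 < (c.toNat : Int) ∧ (c.toNat : Int) < 58) = isDig c := by
  simp only [isDig, Bool.decide_and]
  by_cases h1 : 48 ≤ c.toNat <;> by_cases h2 : c.toNat ≤ 57 <;>
    (simp [h1, h2]; omega)

-- ===== VERDICT (by name: the statement is the Claim_ definition above) =====
theorem solution_my_spec : Claim_equal_solution_my := by
  intro s hdom
  unfold Spec_solution_my solution_my solution_my_alt
  dsimp only
  have hc : ∀ c ∈ s.toList, c.toNat < 128 := by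
    intro c hcm
    have := List.all_eq_true.mp hdom c hcm
    simp [pvDomChar] at this
    omega
  set l := s.toList with hl
  -- codes of the input
  set codes : List Int := l.map (fun c => (c.toNat : Int)) with hcodes
  -- A side: unwind both loops
  rw [PySem.List.foldl_append_singleton_eq_map (fun c => ((c.toNat : Int))) l [],
    List.nil_append, A_loop]
  dsimp only
  -- B side: loop invariant
  obtain ⟨hv, hcnt⟩ := B_loop l (List.replicate 128 0) 0
    (fun c hcm => by rw [List.length_replicate]; exact hc c hcm)
  dsimp only at hv hcnt
  rw [hv]
  set S := PySem.List.sorted codes (fun x => x) false with hS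
  have hperm := PySem.List.sorted_perm codes (fun x => x) false
  -- the digit sum is permutation-invariant, hence equals B's running sum
  have hsum : ((S.filter (fun n => decide (47 < n ∧ n < 58))).map (fun n => n - 48)).sum
      = digSum l := by
    have h1 : ((S.filter (fun n => decide (47 < n ∧ n < 58))).map (fun n => n - 48)).sum
        = ((codes.filter (fun n => decide (47 < n ∧ n < 58))).map (fun n => n - 48)).sum :=
      ((hperm.filter _).map _).sum_eq
    rw [h1, hcodes, List.filter_map, List.map_map]
    have h2 : ((fun n : Int => decide (47 < n ∧ n < 58)) ∘ (fun c : Char => (c.toNat : Int)))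
        = isDig := funext fun c => dig_code c
    rw [h2]
    rfl
  -- the non-digit codes, sorted, are exactly the counting-sort output
  have hbound : ∀ x ∈ codes.filter (fun n => !decide (47 < n ∧ n < 58)), 0 ≤ x ∧ x < 128 := by
    intro x hx
    obtain ⟨c, hcm, rfl⟩ := List.mem_map.mp (List.mem_of_mem_filter hx)
    exact ⟨Int.natCast_nonneg _, by exact_mod_cast hc c hcm⟩
  have hfs : S.filter (fun n => !decide (47 < n ∧ n < 58))
      = PySem.List.sorted (codes.filter (fun n => !decide (47 < n ∧ n < 58))) (fun x => x) false :=
    (PySem.List.sorted_id_eq_of_perm_of_pairwise _ _ (hperm.filter _)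
      ((PySem.List.sorted_pairwise codes _).filter _)).symm
  have hcs : PySem.List.sorted (codes.filter (fun n => !decide (47 < n ∧ n < 58))) (fun x => x) false
      = (((List.range 128).map (fun (i : Nat) =>
          List.replicate ((codes.filter (fun n => !decide (47 < n ∧ n < 58))).count (i : Int)) (i : Int))).flatten) :=
    PySem.List.sorted_id_eq_of_perm_of_pairwise _ _ (cs_perm 128 _ hbound)
      (cs_pairwise 128 _)
  -- counts agree with B's table
  have hcount : ∀ i : Nat, (codes.filter (fun n => !decide (47 < n ∧ n < 58))).count (i : Int)
      = l.countP (fun c => !isDig c && c.toNat == i) := by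
    intro i
    rw [List.count_eq_countP, List.countP_filter, hcodes, List.countP_map]
    refine List.countP_congr (fun c _ => ?_)
    show ((((c.toNat : Int) == (i : Int)) && !decide (47 < (c.toNat : Int) ∧ (c.toNat : Int) < 58)) = true)
      ↔ ((!isDig c && c.toNat == i) = true)
    rw [dig_code]
    have hbe : ((c.toNat : Int) == (i : Int)) = (c.toNat == i) := by
      simp
    rw [hbe, Bool.and_comm]
  congr 1
  congr 1
  · -- the character parts
    rw [hfs, hcs, List.map_flatten, List.map_map]
    refine congrArg List.flatten (List.map_congr_left (fun i hi => ?_))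
    have hi' : i < 128 := List.mem_range.mp hi
    have hz : (List.replicate 128 (0 : Int)).getD i 0 = 0 := by
      rw [List.getD_eq_getElem?_getD, List.getElem?_replicate, if_pos hi']; rfl
    simp only [Function.comp_apply, List.map_replicate, hcnt i, hz, zero_add,
      Int.toNat_natCast, hcount i]
  · -- the digit-sum parts
    rw [hsum]
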